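-- pv_equiv track=rewrite | github.com/pirovc/taxsbp | TaxSBP.py | get_unique_rank_taxids
-- ===== SOURCE A (Python) =====
-- def get_unique_rank_taxids(bin_exclusive, leaves, nodes, ranks, specialization):
-- 	unique_rank_taxids = set()
-- 	single_taxids = set()
-- 	if bin_exclusive!="taxid" and bin_exclusive!=specialization:
-- 		for leaf_taxid in leaves.keys():
-- 			t = get_rank_taxid(leaf_taxid, bin_exclusive, nodes, ranks)
-- 			if t==1: # If taxid was not found on the lineage, consider it as single
-- 				single_taxids.add(leaf_taxid)
-- 			else: # if it was found, add to unique rank list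
-- 				unique_rank_taxids.add(t)
-- 	else:
-- 		single_taxids = set(leaves.keys())
--
-- 	return unique_rank_taxids, single_taxids
--
-- def get_rank_taxid(taxid, rank, nodes, ranks):
-- 	while ranks[taxid]!=rank and taxid!=1: taxid = nodes[taxid]
-- 	return taxid
-- ===== SOURCE B (Python) =====
-- def get_unique_rank_taxids(bin_exclusive, leaves, nodes, ranks, specialization):
-- 	if bin_exclusive == "taxid" or bin_exclusive == specialization:
-- 		return set(), set(leaves.keys())
-- 	cache = {}
-- 	resolved = [_resolve_rank(k, bin_exclusive, nodes, ranks, cache) for k in leaves.keys()]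
-- 	return {r for r in resolved if r != 1}, {k for k, r in zip(leaves.keys(), resolved) if r == 1}
--
-- def _resolve_rank(t, rank, nodes, ranks, cache):
-- 	path = []
-- 	while t not in cache:
-- 		if ranks[t] == rank or t == 1:
-- 			cache[t] = t
-- 			break
-- 		path.append(t)
-- 		t = nodes[t]
-- 	r = cache[t]
-- 	for p in path:
-- 		cache[p] = r
-- 	return r
-- ===== Notes on version B (the rewrite author's own statement) =====
-- stated objective: alternative
-- what changed: B resolves each taxid's rank-ancestor through a shared memo dict with path compression (each taxonomy node is walked at most once overall) and then builds the two result sets by comprehensions over the resolved list, instead of A's independent full lineage walk per leaf inside one accumulating loop.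
import Mathlib
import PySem

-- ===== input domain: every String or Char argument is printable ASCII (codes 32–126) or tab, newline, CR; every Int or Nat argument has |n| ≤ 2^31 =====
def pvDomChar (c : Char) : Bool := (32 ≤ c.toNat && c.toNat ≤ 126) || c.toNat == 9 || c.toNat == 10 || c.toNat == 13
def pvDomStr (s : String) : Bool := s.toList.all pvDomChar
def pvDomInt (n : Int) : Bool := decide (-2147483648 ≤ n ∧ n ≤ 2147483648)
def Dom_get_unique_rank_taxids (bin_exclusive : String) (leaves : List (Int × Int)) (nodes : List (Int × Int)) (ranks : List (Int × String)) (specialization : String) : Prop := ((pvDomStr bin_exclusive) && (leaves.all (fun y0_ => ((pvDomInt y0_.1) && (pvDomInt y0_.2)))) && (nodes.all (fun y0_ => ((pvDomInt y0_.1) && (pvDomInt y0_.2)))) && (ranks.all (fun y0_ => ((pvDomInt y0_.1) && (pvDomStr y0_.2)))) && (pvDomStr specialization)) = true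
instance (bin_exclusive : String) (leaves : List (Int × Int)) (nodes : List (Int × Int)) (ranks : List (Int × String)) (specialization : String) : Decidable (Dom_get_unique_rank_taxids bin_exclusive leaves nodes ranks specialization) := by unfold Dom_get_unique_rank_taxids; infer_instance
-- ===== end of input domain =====

-- B resolves rank-ancestors through a shared memo dict with path compression and builds
-- the result sets by comprehensions over the resolved list (objective: alternative
-- algorithm; equal return values under Pre_ proved below).

-- ===== PORT A =====
-- 'while ranks[taxid]!=rank and taxid!=1: taxid = nodes[taxid]'; the fuel argument only
-- makes the recursion total: under Pre_ the walk stops within nodes.length steps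
-- (the visited taxids are distinct keys of nodes), so the fuel is never exhausted.
def pvRankWalk (N : PySem.Dict Int Int) (R : PySem.Dict Int String) (rank : String) : Nat → Int → Int
  | 0, t => t
  | fuel+1, t =>
      if R.getD t "" ≠ rank ∧ t ≠ 1 then pvRankWalk N R rank fuel (N.getD t 0) else t

def get_unique_rank_taxids (bin_exclusive : String) (leaves : List (Int × Int)) (nodes : List (Int × Int)) (ranks : List (Int × String)) (specialization : String) : List Int × List Int :=
  let L := PySem.Dict.ofList leaves
  if bin_exclusive ≠ "taxid" ∧ bin_exclusive ≠ specialization then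
    let N := PySem.Dict.ofList nodes
    let R := PySem.Dict.ofList ranks
    L.keys.foldl
      (fun (acc : PySem.Set Int × PySem.Set Int) leaf_taxid =>
        let t := pvRankWalk N R bin_exclusive (nodes.length + 1) leaf_taxid
        if t = 1 then (acc.1, PySem.Set.add acc.2 leaf_taxid)
        else (PySem.Set.add acc.1 t, acc.2))
      (PySem.Set.empty, PySem.Set.empty)
  else
    (PySem.Set.empty, PySem.Set.ofList L.keys)

-- ===== PORT B =====
-- '_resolve_rank': 'while t not in cache: if ranks[t]==rank or t==1: cache[t]=t; break;
-- path.append(t); t = nodes[t]'; fuel again only for totality, never exhausted under Pre_.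
def pvResolveLoop (N : PySem.Dict Int Int) (R : PySem.Dict Int String) (rank : String) : Nat → PySem.Dict Int Int → Int → List Int → PySem.Dict Int Int × Int × List Int
  | 0, c, t, path => (c, t, path)
  | fuel+1, c, t, path =>
      if c.contains t then (c, t, path)
      else if R.getD t "" = rank ∨ t = 1 then (c.insert t t, t, path)
      else pvResolveLoop N R rank fuel c (N.getD t 0) (path ++ [t])

-- 'r = cache[t]; for p in path: cache[p] = r; return r'
def pvResolve (N : PySem.Dict Int Int) (R : PySem.Dict Int String) (rank : String) (fuel : Nat) (c : PySem.Dict Int Int) (t : Int) : PySem.Dict Int Int × Int :=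
  let res := pvResolveLoop N R rank fuel c t []
  let r := res.1.getD res.2.1 res.2.1
  (res.2.2.foldl (fun c p => c.insert p r) res.1, r)

def get_unique_rank_taxids_alt (bin_exclusive : String) (leaves : List (Int × Int)) (nodes : List (Int × Int)) (ranks : List (Int × String)) (specialization : String) : List Int × List Int :=
  let L := PySem.Dict.ofList leaves
  if bin_exclusive = "taxid" ∨ bin_exclusive = specialization then
    (PySem.Set.empty, PySem.Set.ofList L.keys)
  else
    let N := PySem.Dict.ofList nodes
    let R := PySem.Dict.ofList ranks
    -- 'resolved = [_resolve_rank(k, …, cache) for k in leaves.keys()]' (cache threaded)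
    let st := L.keys.foldl
      (fun (st : PySem.Dict Int Int × List Int) k =>
        let r := pvResolve N R bin_exclusive (nodes.length + 1) st.1 k
        (r.1, st.2 ++ [r.2]))
      (PySem.Dict.empty, [])
    -- '{r for r in resolved if r != 1}, {k for k, r in zip(leaves.keys(), resolved) if r == 1}'
    (PySem.Set.ofList (st.2.filter (fun r => !(r == 1))),
     PySem.Set.ofList (((L.keys.zip st.2).filter (fun p => p.2 == 1)).map Prod.fst))

-- ===== PRECONDITION & SPEC =====
-- parent iteration: the taxid reached after n steps of 't = nodes[t]' (getD-totalised)
def pvIt (nodes : List (Int × Int)) (n : Nat) (k : Int) : Int :=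
  (fun t => (PySem.Dict.ofList nodes).getD t 0)^[n] k

-- Pre_ excludes exactly the inputs on which Python A raises KeyError or loops forever:
-- when the rank branch is taken, each leaf's parent chain must reach the rank or taxid 1
-- within nodes.length steps (a terminating walk visits distinct keys of nodes, so this
-- bound loses nothing), with every visited taxid present in ranks and, before the stop,
-- in nodes.  On every input admitted by Pre_, A returns.
def Pre_get_unique_rank_taxids (bin_exclusive : String) (leaves : List (Int × Int)) (nodes : List (Int × Int)) (ranks : List (Int × String)) (specialization : String) : Prop :=
  bin_exclusive = "taxid" ∨ bin_exclusive = specialization ∨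
  (∀ p ∈ leaves, ∃ n < nodes.length + 1,
    ((PySem.Dict.ofList ranks).getD (pvIt nodes n p.1) "" = bin_exclusive ∨ pvIt nodes n p.1 = 1) ∧
    ∀ m ≤ n, (PySem.Dict.ofList ranks).contains (pvIt nodes m p.1) = true ∧
      (m = n ∨ (PySem.Dict.ofList nodes).contains (pvIt nodes m p.1) = true))
instance (bin_exclusive : String) (leaves : List (Int × Int)) (nodes : List (Int × Int)) (ranks : List (Int × String)) (specialization : String) : Decidable (Pre_get_unique_rank_taxids bin_exclusive leaves nodes ranks specialization) := by unfold Pre_get_unique_rank_taxids; infer_instance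

def pvWitness_get_unique_rank_taxids : String × (List (Int × Int)) × (List (Int × Int)) × (List (Int × String)) × String :=
  ("genus", [(7, 0), (5, 0)], [(7, 3), (5, 3), (3, 1)], [(7, "species"), (5, "species"), (3, "genus"), (1, "root")], "assembly")

def Spec_get_unique_rank_taxids (bin_exclusive : String) (leaves : List (Int × Int)) (nodes : List (Int × Int)) (ranks : List (Int × String)) (specialization : String) (out : List Int × List Int) : Prop := out = get_unique_rank_taxids_alt bin_exclusive leaves nodes ranks specialization
instance (bin_exclusive : String) (leaves : List (Int × Int)) (nodes : List (Int × Int)) (ranks : List (Int × String)) (specialization : String) (out : List Int × List Int) : Decidable (Spec_get_unique_rank_taxids bin_exclusive leaves nodes ranks specialization out) := by unfold Spec_get_unique_rank_taxids; infer_instance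

-- ===== CLAIM =====
def Claim_equal_get_unique_rank_taxids : Prop := ∀ (bin_exclusive : String) (leaves : List (Int × Int)) (nodes : List (Int × Int)) (ranks : List (Int × String)) (specialization : String), Dom_get_unique_rank_taxids bin_exclusive leaves nodes ranks specialization → Pre_get_unique_rank_taxids bin_exclusive leaves nodes ranks specialization → Spec_get_unique_rank_taxids bin_exclusive leaves nodes ranks specialization (get_unique_rank_taxids bin_exclusive leaves nodes ranks specialization)

-- ===== LEMMAS AND PROOFS =====

-- the stop condition of both walks
def pvStop (ranks : List (Int × String)) (rank : String) (t : Int) : Prop :=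
  (PySem.Dict.ofList ranks).getD t "" = rank ∨ t = 1

-- A's walk computes the first stop point of the parent iteration (fuel beyond the stop index)
theorem pvWalkA (nodes : List (Int × Int)) (ranks : List (Int × String)) (rank : String) :
    ∀ (n : Nat) (k : Int), pvStop ranks rank (pvIt nodes n k) →
      (∀ m < n, ¬ pvStop ranks rank (pvIt nodes m k)) →
      ∀ f, n < f →
        pvRankWalk (PySem.Dict.ofList nodes) (PySem.Dict.ofList ranks) rank f k = pvIt nodes n k := by
  intro n
  induction n with
  | zero =>
      intro k hs _ f hf
      obtain ⟨f', rfl⟩ : ∃ g, f = g + 1 := ⟨f - 1, by omega⟩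
      have hs0 : pvStop ranks rank k := by simpa [pvIt] using hs
      simp only [pvRankWalk]
      rw [if_neg (by unfold pvStop at hs0; tauto)]
      simp [pvIt]
  | succ m ih =>
      intro k hs hm f hf
      obtain ⟨f', rfl⟩ : ∃ g, f = g + 1 := ⟨f - 1, by omega⟩
      have hns : ¬ pvStop ranks rank k := by
        have := hm 0 (by omega); simpa [pvIt] using this
      simp only [pvRankWalk]
      rw [if_pos (by unfold pvStop at hns; push Not at hns; exact hns)]
      have hshift : ∀ j, pvIt nodes j ((PySem.Dict.ofList nodes).getD k 0) = pvIt nodes (j + 1) k := by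
        intro j; simp [pvIt, Function.iterate_succ_apply]
      have := ih ((PySem.Dict.ofList nodes).getD k 0)
        (by rw [hshift]; exact hs)
        (by intro j hj; rw [hshift]; exact hm (j + 1) (by omega))
        f' (by omega)
      rw [this, hshift]

-- cache invariant: every cached value is A's walk result for its key
def pvInv (nodes : List (Int × Int)) (ranks : List (Int × String)) (rank : String) (c : PySem.Dict Int Int) : Prop :=
  ∀ q v, c.get? q = some v →
    v = pvRankWalk (PySem.Dict.ofList nodes) (PySem.Dict.ofList ranks) rank (nodes.length + 1) q

theorem pvLoopB (nodes : List (Int × Int)) (ranks : List (Int × String)) (rank : String) :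
    ∀ (n : Nat), n ≤ nodes.length →
      ∀ (k : Int) (c : PySem.Dict Int Int) (path : List Int) (f : Nat),
        pvStop ranks rank (pvIt nodes n k) →
        (∀ m < n, ¬ pvStop ranks rank (pvIt nodes m k)) →
        pvInv nodes ranks rank c → n < f →
        ∃ c' t' ext, pvResolveLoop (PySem.Dict.ofList nodes) (PySem.Dict.ofList ranks) rank f c k path = (c', t', path ++ ext) ∧
          pvInv nodes ranks rank c' ∧
          c'.getD t' t' = pvIt nodes n k ∧
          ∀ q ∈ ext, pvRankWalk (PySem.Dict.ofList nodes) (PySem.Dict.ofList ranks) rank (nodes.length + 1) q = pvIt nodes n k := by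
  intro n
  induction n with
  | zero =>
      intro hn k c path f hs hm hc hf
      obtain ⟨f', rfl⟩ : ∃ g, f = g + 1 := ⟨f - 1, by omega⟩
      have hs0 : pvStop ranks rank k := by simpa [pvIt] using hs
      simp only [pvResolveLoop]
      by_cases hk : c.contains k = true
      · rw [if_pos hk]
        have hsome : (c.get? k).isSome = true := by
          rw [← PySem.Dict.contains_eq_isSome_get?]; exact hk
        obtain ⟨v, hv⟩ := Option.isSome_iff_exists.mp hsome
        refine ⟨c, k, [], by simp, hc, ?_, by simp⟩
        rw [PySem.Dict.getD_eq_get?_getD, hv, Option.getD_some, hc k v hv,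
          pvWalkA nodes ranks rank 0 k hs (by omega) _ (by omega)]
      · rw [if_neg hk, if_pos (by unfold pvStop at hs0; tauto)]
        refine ⟨c.insert k k, k, [], by simp, ?_, ?_, by simp⟩
        · intro q v hv
          rw [PySem.Dict.get?_insert] at hv
          split at hv
          · rename_i heq
            injection hv with hv
            rw [heq, ← hv, pvWalkA nodes ranks rank 0 k hs (by omega) _ (by omega)]
            simp [pvIt]
          · exact hc q v hv
        · rw [PySem.Dict.getD_eq_get?_getD, PySem.Dict.get?_insert]
          simp [pvIt]
  | succ m ih =>
      intro hn k c path f hs hm hc hf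
      obtain ⟨f', rfl⟩ : ∃ g, f = g + 1 := ⟨f - 1, by omega⟩
      have hns : ¬ pvStop ranks rank k := by
        have := hm 0 (by omega); simpa [pvIt] using this
      have hwk : pvRankWalk (PySem.Dict.ofList nodes) (PySem.Dict.ofList ranks) rank (nodes.length + 1) k = pvIt nodes (m + 1) k :=
        pvWalkA nodes ranks rank (m + 1) k hs hm _ (by omega)
      simp only [pvResolveLoop]
      by_cases hk : c.contains k = true
      · rw [if_pos hk]
        have hsome : (c.get? k).isSome = true := by
          rw [← PySem.Dict.contains_eq_isSome_get?]; exact hk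
        obtain ⟨v, hv⟩ := Option.isSome_iff_exists.mp hsome
        refine ⟨c, k, [], by simp, hc, ?_, by simp⟩
        rw [PySem.Dict.getD_eq_get?_getD, hv, Option.getD_some, hc k v hv, hwk]
      · rw [if_neg hk, if_neg (by unfold pvStop at hns; push Not at hns; simp [hns])]
        have hshift : ∀ j, pvIt nodes j ((PySem.Dict.ofList nodes).getD k 0) = pvIt nodes (j + 1) k := by
          intro j; simp [pvIt, Function.iterate_succ_apply]
        obtain ⟨c', t', ext, heq, hinv, hgd, hext⟩ :=
          ih (by omega) ((PySem.Dict.ofList nodes).getD k 0) c (path ++ [k]) f'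
            (by rw [hshift]; exact hs)
            (by intro j hj; rw [hshift]; exact hm (j + 1) (by omega))
            hc (by omega)
        refine ⟨c', t', k :: ext, ?_, hinv, by rw [hgd, hshift], ?_⟩
        · rw [heq]; simp
        · intro q hq
          rcases List.mem_cons.mp hq with rfl | hq
          · exact hwk
          · rw [hext q hq, hshift]

theorem pvResolveB (nodes : List (Int × Int)) (ranks : List (Int × String)) (rank : String)
    (n : Nat) (hn : n ≤ nodes.length) (k : Int) (c : PySem.Dict Int Int)
    (hs : pvStop ranks rank (pvIt nodes n k))
    (hm : ∀ m < n, ¬ pvStop ranks rank (pvIt nodes m k))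
    (hc : pvInv nodes ranks rank c) :
    ∃ c', pvResolve (PySem.Dict.ofList nodes) (PySem.Dict.ofList ranks) rank (nodes.length + 1) c k
      = (c', pvRankWalk (PySem.Dict.ofList nodes) (PySem.Dict.ofList ranks) rank (nodes.length + 1) k) ∧
      pvInv nodes ranks rank c' := by
  obtain ⟨c', t', ext, heq, hinv, hgd, hext⟩ :=
    pvLoopB nodes ranks rank n hn k c [] (nodes.length + 1) hs hm hc (by omega)
  have hwk : pvRankWalk (PySem.Dict.ofList nodes) (PySem.Dict.ofList ranks) rank (nodes.length + 1) k = pvIt nodes n k :=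
    pvWalkA nodes ranks rank n k hs hm _ (by omega)
  have hfold : ∀ (l : List Int) (c0 : PySem.Dict Int Int), pvInv nodes ranks rank c0 →
      (∀ q ∈ l, pvRankWalk (PySem.Dict.ofList nodes) (PySem.Dict.ofList ranks) rank (nodes.length + 1) q = pvIt nodes n k) →
      pvInv nodes ranks rank (l.foldl (fun c p => c.insert p (pvIt nodes n k)) c0) := by
    intro l
    induction l with
    | nil => intro c0 h0 _; exact h0
    | cons a l ihl =>
        intro c0 h0 hall
        refine ihl _ ?_ (fun q hq => hall q (by simp [hq]))
        intro q v hv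
        rw [PySem.Dict.get?_insert] at hv
        split at hv
        · rename_i heq2
          injection hv with hv
          rw [heq2, ← hv, hall a (by simp)]
        · exact h0 q v hv
  refine ⟨ext.foldl (fun c p => c.insert p (pvIt nodes n k)) c', ?_, hfold ext c' hinv hext⟩
  unfold pvResolve
  rw [heq]
  simp only [List.nil_append]
  rw [hgd, hwk]

-- B's threading fold produces exactly the list of A-walk results
theorem pvFoldB (nodes : List (Int × Int)) (ranks : List (Int × String)) (rank : String) :
    ∀ (ks : List Int),
      (∀ k ∈ ks, ∃ n ≤ nodes.length, pvStop ranks rank (pvIt nodes n k) ∧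
        ∀ m < n, ¬ pvStop ranks rank (pvIt nodes m k)) →
      ∀ (c : PySem.Dict Int Int) (rs : List Int), pvInv nodes ranks rank c →
      ∃ c', ks.foldl
          (fun (st : PySem.Dict Int Int × List Int) k =>
            let r := pvResolve (PySem.Dict.ofList nodes) (PySem.Dict.ofList ranks) rank (nodes.length + 1) st.1 k
            (r.1, st.2 ++ [r.2])) (c, rs)
        = (c', rs ++ ks.map (fun k => pvRankWalk (PySem.Dict.ofList nodes) (PySem.Dict.ofList ranks) rank (nodes.length + 1) k)) := by
  intro ks
  induction ks with
  | nil => intro _ c rs hc; exact ⟨c, by simp⟩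
  | cons k ks ih =>
      intro hks c rs hc
      obtain ⟨n, hn, hs, hm⟩ := hks k (by simp)
      obtain ⟨c', heq, hinv⟩ := pvResolveB nodes ranks rank n hn k c hs hm hc
      obtain ⟨c'', heq2⟩ := ih (fun k' hk' => hks k' (by simp [hk'])) c'
        (rs ++ [pvRankWalk (PySem.Dict.ofList nodes) (PySem.Dict.ofList ranks) rank (nodes.length + 1) k]) hinv
      refine ⟨c'', ?_⟩
      simp only [List.foldl_cons, heq, heq2, List.map_cons]
      simp

-- A's accumulating fold, expressed through filters of the walk results
theorem pvFoldA (nodes : List (Int × Int)) (ranks : List (Int × String)) (rank : String) :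
    ∀ (ks : List Int) (u s : PySem.Set Int),
      ks.foldl
        (fun (acc : PySem.Set Int × PySem.Set Int) leaf_taxid =>
          let t := pvRankWalk (PySem.Dict.ofList nodes) (PySem.Dict.ofList ranks) rank (nodes.length + 1) leaf_taxid
          if t = 1 then (acc.1, PySem.Set.add acc.2 leaf_taxid)
          else (PySem.Set.add acc.1 t, acc.2)) (u, s)
      = (((ks.map (fun k => pvRankWalk (PySem.Dict.ofList nodes) (PySem.Dict.ofList ranks) rank (nodes.length + 1) k)).filter (fun r => !(r == 1))).foldl PySem.Set.add u,
         ((ks.filter (fun k => pvRankWalk (PySem.Dict.ofList nodes) (PySem.Dict.ofList ranks) rank (nodes.length + 1) k == 1)).foldl PySem.Set.add s)) := by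
  intro ks
  induction ks with
  | nil => intro u s; simp
  | cons k ks ih =>
      intro u s
      simp only [List.foldl_cons, List.map_cons, List.filter_cons]
      by_cases h1 : pvRankWalk (PySem.Dict.ofList nodes) (PySem.Dict.ofList ranks) rank (nodes.length + 1) k = 1
      · rw [if_pos h1]
        simp only [h1]
        rw [ih]
        simp
      · rw [if_neg h1]
        have hb : ((pvRankWalk (PySem.Dict.ofList nodes) (PySem.Dict.ofList ranks) rank (nodes.length + 1) k == 1) : Bool) = false := by
          simp [h1]
        rw [ih]
        simp [hb]

theorem pvZipFilter (w : Int → Int) :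
    ∀ (ks : List Int), ((ks.zip (ks.map w)).filter (fun p => p.2 == 1)).map Prod.fst
      = ks.filter (fun k => w k == 1) := by
  intro ks
  induction ks with
  | nil => simp
  | cons k ks ih =>
      simp only [List.map_cons, List.zip_cons_cons, List.filter_cons]
      by_cases h1 : w k = 1
      · simp only [h1]
        simp [ih]
      · have hb : ((w k == 1) : Bool) = false := by simp [h1]
        simp [hb, ih]

theorem pvMemItemsUpdate {κ ν : Type} [BEq κ] [LawfulBEq κ] (l : List (κ × ν)) :
    ∀ (d : PySem.Dict κ ν), ∀ p ∈ (d.update l).items, p ∈ d.items ∨ p ∈ l := by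
  induction l with
  | nil => intro d p hp; exact Or.inl hp
  | cons a l ih =>
      intro d p hp
      have h1 : (d.update (a :: l)) = ((d.insert a.1 a.2).update l) := rfl
      rw [h1] at hp
      rcases ih (d.insert a.1 a.2) p hp with h | h
      · rw [PySem.Dict.mem_items_insert] at h
        rcases h with h | h
        · exact Or.inr (by simp [h])
        · exact Or.inl h.1
      · exact Or.inr (List.mem_cons_of_mem _ h)

theorem pvMemItemsOfList {κ ν : Type} [BEq κ] [LawfulBEq κ] (l : List (κ × ν)) :
    ∀ p ∈ (PySem.Dict.ofList l).items, p ∈ l := by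
  intro p hp
  rcases pvMemItemsUpdate l PySem.Dict.empty p hp with h | h
  · simp [PySem.Dict.empty] at h
  · exact h

-- ===== VERDICT =====
theorem get_unique_rank_taxids_spec : Claim_equal_get_unique_rank_taxids := by
  intro bin_exclusive leaves nodes ranks specialization hDom hPre
  unfold Spec_get_unique_rank_taxids
  unfold get_unique_rank_taxids get_unique_rank_taxids_alt
  by_cases hb : bin_exclusive = "taxid" ∨ bin_exclusive = specialization
  · rw [if_neg (by tauto), if_pos hb]
  · have hb' : bin_exclusive ≠ "taxid" ∧ bin_exclusive ≠ specialization := by tauto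
    rw [if_pos hb', if_neg hb]
    rcases hPre with h | h | hP
    · exact absurd h hb'.1
    · exact absurd h hb'.2
    · have Hk : ∀ k ∈ (PySem.Dict.ofList leaves).keys,
          ∃ n ≤ nodes.length, pvStop ranks bin_exclusive (pvIt nodes n k) ∧
            ∀ m < n, ¬ pvStop ranks bin_exclusive (pvIt nodes m k) := by
        intro k hk
        obtain ⟨p, hp, hpk⟩ := List.mem_map.mp (hk : k ∈ (PySem.Dict.ofList leaves).items.map (fun x => x.1))
        obtain ⟨n, hn, hstop, _⟩ := hP p (pvMemItemsOfList leaves p hp)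
        haveI : DecidablePred (fun j => pvStop ranks bin_exclusive (pvIt nodes j k)) := by
          intro j; unfold pvStop; infer_instance
        have hex : ∃ j, pvStop ranks bin_exclusive (pvIt nodes j k) := ⟨n, by rw [hpk] at hstop; exact hstop⟩
        refine ⟨Nat.find hex, ?_, Nat.find_spec hex, fun m hm => Nat.find_min hex hm⟩
        have := Nat.find_min' hex (by rw [hpk] at hstop; exact hstop)
        omega
      have hinv0 : pvInv nodes ranks bin_exclusive PySem.Dict.empty := by
        intro q v hv
        rw [PySem.Dict.get?_empty] at hv
        cases hv
      obtain ⟨c', heqB⟩ := pvFoldB nodes ranks bin_exclusive (PySem.Dict.ofList leaves).keys Hk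
        PySem.Dict.empty [] hinv0
      simp only [heqB, List.nil_append]
      rw [pvFoldA nodes ranks bin_exclusive (PySem.Dict.ofList leaves).keys PySem.Set.empty PySem.Set.empty]
      rw [pvZipFilter (fun k => pvRankWalk (PySem.Dict.ofList nodes) (PySem.Dict.ofList ranks) bin_exclusive (nodes.length + 1) k) (PySem.Dict.ofList leaves).keys]
      rw [PySem.Set.ofList_eq_foldl, PySem.Set.ofList_eq_foldl]
      rfl
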